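-- pv_equiv track=rewrite | github.com/jenerational/Python_NYU-CS-1114 | * hw/10/Jennie_Walker_jw4043_hw10.py | createPreList
-- ===== SOURCE A (Python) =====
-- def createPreList(lst):
--     totalList = []
--     for x in range(1, len(lst)+1):
--         subList = []
--         for i in lst[:x]:
--             subList.append(i)
--         totalList.append(subList)
--     return totalList
-- ===== SOURCE B (Python) =====
-- def createPreList(lst):
--     totalList = []
--     cur = []
--     for i in lst:
--         cur = cur + [i]
--         totalList.append(cur)
--     return totalList
-- ===== Notes on version B (the rewrite author's own statement) =====
-- stated objective: simpler
-- what changed: Single pass over the list extending a running prefix, instead of a nested loop that re-slices and recopies lst[:x] for every x.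
import Mathlib
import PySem

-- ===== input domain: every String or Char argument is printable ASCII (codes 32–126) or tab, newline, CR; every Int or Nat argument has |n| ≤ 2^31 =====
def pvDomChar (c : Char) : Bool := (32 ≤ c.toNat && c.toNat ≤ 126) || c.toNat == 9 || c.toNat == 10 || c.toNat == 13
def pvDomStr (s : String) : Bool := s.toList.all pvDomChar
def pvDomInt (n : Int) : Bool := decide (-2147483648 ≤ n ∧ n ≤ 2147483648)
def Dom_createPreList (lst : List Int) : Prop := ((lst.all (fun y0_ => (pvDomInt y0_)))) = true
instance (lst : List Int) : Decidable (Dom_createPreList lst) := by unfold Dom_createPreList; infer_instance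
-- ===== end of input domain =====

-- ===== PORT A =====
-- B builds each prefix incrementally in one pass instead of A's nested re-slicing loop (objective: simpler).
def createPreList (lst : List Int) : List (List Int) :=
  (PySem.List.pyRange 1 (lst.length + 1) 1).foldl
    (fun totalList x =>
      let subList := (PySem.List.slice lst none (some x)).foldl (fun sub i => sub ++ [i]) []
      totalList ++ [subList]) []

-- ===== PORT B =====
def createPreList_alt (lst : List Int) : List (List Int) :=
  (lst.foldl (fun (st : List (List Int) × List Int) i =>
      let cur := st.2 ++ [i]
      (st.1 ++ [cur], cur)) ([], [])).1

-- ===== PRECONDITION & SPEC =====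
def Spec_createPreList (lst : List Int) (out : List (List Int)) : Prop := out = createPreList_alt lst
instance (lst : List Int) (out : List (List Int)) : Decidable (Spec_createPreList lst out) := by unfold Spec_createPreList; infer_instance

-- ===== CLAIM (what is proved, stated in full; the proofs are below) =====
def Claim_equal_createPreList : Prop := ∀ (lst : List Int), Dom_createPreList lst → Spec_createPreList lst (createPreList lst)

-- ===== LEMMAS AND PROOFS =====

-- ===== VERDICT (by name: the statement is the Claim_ definition above) =====
-- B's fold with explicit accumulator: result = acc ++ prefixes of l each prepended with pre
lemma alt_foldl_eq (l : List Int) (acc : List (List Int)) (pre : List Int) :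
    (l.foldl (fun (st : List (List Int) × List Int) i =>
        let cur := st.2 ++ [i]
        (st.1 ++ [cur], cur)) (acc, pre)).1
      = acc ++ (List.range l.length).map (fun k => pre ++ l.take (k + 1)) := by
  induction l generalizing acc pre with
  | nil => simp
  | cons a l ih =>
    simp only [List.foldl_cons, ih, List.length_cons, List.range_succ_eq_map,
      List.map_cons, List.map_map]
    simp [Function.comp, List.append_assoc]

theorem createPreList_spec : Claim_equal_createPreList := by
  intro lst _
  unfold Spec_createPreList createPreList createPreList_alt
  rw [alt_foldl_eq]
  simp only [PySem.List.foldl_append_singleton_eq_self, List.nil_append,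
    PySem.List.foldl_append_singleton_eq_map, PySem.List.pyRange_one]
  have h : ((lst.length : Int) + 1 - 1).toNat = lst.length := by omega
  rw [h, List.map_map]
  apply List.map_congr_left
  intro k hk
  simp only [Function.comp]
  rw [PySem.List.slice_to]
  · congr 1
    omega
  · positivity
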